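-- pv_equiv track=rewrite | github.com/kgladstone/SmartWordle | runner.py | letter_dict_from_index
-- ===== SOURCE A (Python) =====
-- def letter_dict_from_index(words, letter_index):
-- 	letter_dict = dict()
-- 	letter_dict_counts = dict()
-- 	for word in words:
-- 		letter = word[letter_index]
-- 		if letter in letter_dict:
-- 			letter_dict[letter].append(word)
-- 			letter_dict_counts[letter] += 1
-- 		else:
-- 			letter_dict[letter] = [word]
-- 			letter_dict_counts[letter] = 1
-- 	return (letter_dict, letter_dict_counts)
-- ===== SOURCE B (Python) =====
-- def letter_dict_from_index(words, letter_index):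
--     # Pass 1: the distinct letters in first-occurrence order.
--     letters = []
--     for word in words:
--         letter = word[letter_index]
--         if letter not in letters:
--             letters.append(letter)
--     # Pass 2: one filtering scan of words per distinct letter.
--     letter_dict = {l: [w for w in words if w[letter_index] == l] for l in letters}
--     letter_dict_counts = {l: len(letter_dict[l]) for l in letters}
--     return (letter_dict, letter_dict_counts)
-- ===== Notes on version B (the rewrite author's own statement) =====
-- stated objective: alternative
-- what changed: Instead of A's single pass that grows groups and counts incrementally in two dicts, B first collects the distinct letters in first-occurrence order and then builds each group by an independent filtering scan of words per letter, deriving counts from the finished groups.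
import Mathlib
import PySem

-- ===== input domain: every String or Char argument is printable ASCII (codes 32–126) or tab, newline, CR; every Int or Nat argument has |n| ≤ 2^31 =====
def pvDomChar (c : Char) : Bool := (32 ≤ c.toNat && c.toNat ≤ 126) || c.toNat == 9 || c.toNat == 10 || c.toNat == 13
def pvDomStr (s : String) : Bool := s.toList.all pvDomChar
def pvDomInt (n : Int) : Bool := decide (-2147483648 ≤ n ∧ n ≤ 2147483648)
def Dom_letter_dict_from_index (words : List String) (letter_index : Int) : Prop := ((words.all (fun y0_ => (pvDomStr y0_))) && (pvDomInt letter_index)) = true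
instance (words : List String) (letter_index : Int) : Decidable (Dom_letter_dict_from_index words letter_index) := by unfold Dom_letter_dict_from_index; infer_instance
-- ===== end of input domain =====

-- B collects the distinct letters first and builds each group by an independent
-- filtering scan of words per letter (counts from the finished groups), instead of
-- A's single pass growing two dicts incrementally; alternative decomposition, not faster.


-- ===== PORT A =====
-- for word in words: letter = word[letter_index]; if letter in letter_dict: append/+=1 else: [word]/1
def letter_dict_from_index (words : List String) (letter_index : Int) : (List (String × List String)) × (List (String × Int)) :=
  let st := words.foldl
    (fun (st : PySem.Dict String (List String) × PySem.Dict String Int) word =>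
      match PySem.Str.pyGet? word letter_index with
      | none => st   -- Python raises IndexError here; excluded by Pre_
      | some ch =>
        let letter := String.ofList [ch]
        if st.1.contains letter then
          (st.1.modify letter [] (fun g => g ++ [word]), st.2.modify letter 0 (fun n => n + 1))
        else
          (st.1.insert letter [word], st.2.insert letter 1))
    (PySem.Dict.empty, PySem.Dict.empty)
  (st.1.items, st.2.items)

-- ===== PORT B =====
def letter_dict_from_index_alt (words : List String) (letter_index : Int) : (List (String × List String)) × (List (String × Int)) :=
  -- letters = []; for word in words: if word[letter_index] not in letters: letters.append(...)
  let letters := words.foldl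
    (fun (ls : List String) word =>
      match PySem.Str.pyGet? word letter_index with
      | none => ls   -- Python raises IndexError here; excluded by Pre_
      | some ch =>
        let letter := String.ofList [ch]
        if letter ∈ ls then ls else ls ++ [letter])
    []
  -- {l: [w for w in words if w[letter_index] == l] for l in letters}
  let d := letters.foldl
    (fun (d : PySem.Dict String (List String)) l =>
      d.insert l (words.filter (fun w =>
        match PySem.Str.pyGet? w letter_index with
        | none => false   -- Python raises IndexError here; excluded by Pre_
        | some ch => String.ofList [ch] == l)))
    PySem.Dict.empty
  -- {l: len(letter_dict[l]) for l in letters}; every l ∈ letters is a key of d, so getD is exact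
  let counts := letters.foldl
    (fun (c : PySem.Dict String Int) l => c.insert l ((d.getD l []).length : Int))
    PySem.Dict.empty
  (d.items, counts.items)

-- ===== PRECONDITION & SPEC =====
-- Pre_ excludes exactly the inputs where word[letter_index] raises IndexError for some word.
def Pre_letter_dict_from_index (words : List String) (letter_index : Int) : Prop :=
  ∀ w ∈ words, (PySem.Str.pyGet? w letter_index).isSome = true
instance (words : List String) (letter_index : Int) : Decidable (Pre_letter_dict_from_index words letter_index) := by unfold Pre_letter_dict_from_index; infer_instance

def pvWitness_letter_dict_from_index : List String × Int := (["ab", "cb", "ad"], 1)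

def Spec_letter_dict_from_index (words : List String) (letter_index : Int) (out : (List (String × List String)) × (List (String × Int))) : Prop := out = letter_dict_from_index_alt words letter_index
instance (words : List String) (letter_index : Int) (out : (List (String × List String)) × (List (String × Int))) : Decidable (Spec_letter_dict_from_index words letter_index out) := by unfold Spec_letter_dict_from_index; infer_instance

-- ===== CLAIM (what is proved, stated in full; the proofs are below) =====
def Claim_equal_letter_dict_from_index : Prop := ∀ (words : List String) (letter_index : Int), Dom_letter_dict_from_index words letter_index → Pre_letter_dict_from_index words letter_index → Spec_letter_dict_from_index words letter_index (letter_dict_from_index words letter_index)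

-- ===== LEMMAS AND PROOFS =====

-- the letter of a word, as A and B both compute it (total stand-in; agrees under Pre_)
def pvKey (letter_index : Int) (w : String) : String :=
  String.ofList [((PySem.Str.pyGet? w letter_index).getD ' ')]

-- counts dict as a function of the groups dict
def pvMapLen (d : PySem.Dict String (List String)) : PySem.Dict String Int :=
  PySem.Dict.mk (d.items.map (fun p => (p.1, (p.2.length : Int))))

lemma get?_pvMapLen (d : PySem.Dict String (List String)) (k : String) :
    (pvMapLen d).get? k = (d.get? k).map (fun g => (g.length : Int)) := by
  obtain ⟨l⟩ := d
  induction l with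
  | nil => rfl
  | cons p rest ih =>
    obtain ⟨pk, pv⟩ := p
    simp only [pvMapLen, List.map_cons, PySem.Dict.get?_mk_cons] at *
    by_cases h : pk == k <;> simp [h, ih]

lemma contains_pvMapLen (d : PySem.Dict String (List String)) (k : String) :
    (pvMapLen d).contains k = d.contains k := by
  rw [PySem.Dict.contains_eq_isSome_get?, PySem.Dict.contains_eq_isSome_get?, get?_pvMapLen]
  cases d.get? k <;> simp

lemma getD_pvMapLen_of_contains (d : PySem.Dict String (List String)) (k : String)
    (h : d.contains k = true) :
    (pvMapLen d).getD k 0 = ((d.getD k []).length : Int) := by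
  rw [PySem.Dict.getD_eq_get?_getD, PySem.Dict.getD_eq_get?_getD, get?_pvMapLen]
  rw [PySem.Dict.contains_eq_isSome_get?] at h
  cases hg : d.get? k with
  | none => rw [hg] at h; simp at h
  | some g => simp

lemma pvMapLen_insert (d : PySem.Dict String (List String)) (k : String) (v : List String) :
    pvMapLen (d.insert k v) = (pvMapLen d).insert k (v.length : Int) := by
  apply PySem.Dict.ext
  show ((d.insert k v).items.map _) = ((pvMapLen d).insert k (v.length : Int)).items
  rw [PySem.Dict.items_insert, PySem.Dict.items_insert, contains_pvMapLen]
  by_cases h : d.contains k = true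
  · simp only [h, if_true, pvMapLen, List.map_map]
    apply List.map_congr_left
    intro p _
    by_cases hp : p.1 = k <;> simp [hp]
  · simp only [Bool.not_eq_true] at h
    simp [h, pvMapLen]

-- A's paired loop, with the letter written through pvKey, carries counts = pvMapLen groups
lemma loop_inv (words : List String) (letter_index : Int) (d : PySem.Dict String (List String)) :
    words.foldl
      (fun (st : PySem.Dict String (List String) × PySem.Dict String Int) word =>
        let letter := pvKey letter_index word
        if st.1.contains letter then
          (st.1.modify letter [] (fun g => g ++ [word]), st.2.modify letter 0 (fun n => n + 1))
        else
          (st.1.insert letter [word], st.2.insert letter 1))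
      (d, pvMapLen d)
    = (let g := words.foldl
        (fun (d : PySem.Dict String (List String)) word =>
          d.modify (pvKey letter_index word) [] (fun g => g ++ [word]))
        d
       (g, pvMapLen g)) := by
  induction words generalizing d with
  | nil => rfl
  | cons word rest ih =>
    simp only [List.foldl_cons]
    set letter := pvKey letter_index word with hl
    by_cases h : d.contains letter = true
    · have step :
        ((d.modify letter [] (fun g => g ++ [word])),
         ((pvMapLen d).modify letter 0 (fun n => n + 1)))
        = ((d.modify letter [] (fun g => g ++ [word])),
           pvMapLen (d.modify letter [] (fun g => g ++ [word]))) := by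
        simp only [PySem.Dict.modify, pvMapLen_insert, Prod.mk.injEq, true_and]
        rw [getD_pvMapLen_of_contains d letter h]
        simp
      simp only [h, if_true, step]
      exact ih _
    · simp only [h]
      have hd : d.modify letter [] (fun g => g ++ [word]) = d.insert letter [word] := by
        simp only [PySem.Dict.modify]
        rw [PySem.Dict.getD_of_not_contains]
        · rfl
        · simpa using h
      have hm : pvMapLen (d.insert letter [word]) = (pvMapLen d).insert letter 1 := by
        rw [pvMapLen_insert]
        rfl
      simp only [Bool.not_eq_true] at h
      simp only [Bool.false_eq_true, if_false]
      rw [hd, ← hm]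
      exact ih _

-- the groups fold, keyed through pvKey
def pvGroups (words : List String) (letter_index : Int) : PySem.Dict String (List String) :=
  words.foldl (fun d w => d.modify (pvKey letter_index w) [] (fun g => g ++ [w])) PySem.Dict.empty

lemma pvGroups_keys (words : List String) (letter_index : Int) :
    (pvGroups words letter_index).keys = PySem.Set.ofList (words.map (pvKey letter_index)) := by
  unfold pvGroups
  rw [PySem.Dict.keys_foldl_modify_key]
  simp [PySem.Dict.keys_empty, PySem.Set.update, PySem.Set.ofList_eq_foldl]

lemma pvGroups_keys_nodup (words : List String) (letter_index : Int) :
    (pvGroups words letter_index).keys.Nodup := by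
  unfold pvGroups
  exact PySem.Dict.nodup_keys_foldl_modify_key _ _ _ _ _ PySem.Dict.nodup_keys_empty

lemma pvGroups_getD (words : List String) (letter_index : Int) (l : String) :
    (pvGroups words letter_index).getD l []
      = words.filter (fun w => pvKey letter_index w == l) := by
  have hrw : pvGroups words letter_index
      = (words.map (fun w => (pvKey letter_index w, w))).foldl
          (fun d p => d.modify p.1 [] (fun g => g ++ [p.2])) PySem.Dict.empty := by
    rw [List.foldl_map]; rfl
  rw [hrw, PySem.Dict.getD_foldl_modify_append, List.filter_map, List.map_map]
  simp [Function.comp_def]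

lemma pvGroups_items (words : List String) (letter_index : Int) :
    (pvGroups words letter_index).items
      = (PySem.Set.ofList (words.map (pvKey letter_index))).map
          (fun l => (l, words.filter (fun w => pvKey letter_index w == l))) := by
  rw [PySem.Dict.items_eq_map_keys (pvGroups words letter_index) (pvGroups_keys_nodup words letter_index) [],
      pvGroups_keys]
  exact List.map_congr_left (fun l _ => by rw [pvGroups_getD])

-- ===== VERDICT (by name: the statement is the Claim_ definition above) =====
theorem letter_dict_from_index_spec : Claim_equal_letter_dict_from_index := by
  unfold Claim_equal_letter_dict_from_index
  intro words letter_index _ hp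
  unfold Spec_letter_dict_from_index letter_dict_from_index letter_dict_from_index_alt
  -- A's fold, rewritten through pvKey under Pre_
  have hA : words.foldl
      (fun (st : PySem.Dict String (List String) × PySem.Dict String Int) word =>
        match PySem.Str.pyGet? word letter_index with
        | none => st
        | some ch =>
          let letter := String.ofList [ch]
          if st.1.contains letter then
            (st.1.modify letter [] (fun g => g ++ [word]), st.2.modify letter 0 (fun n => n + 1))
          else
            (st.1.insert letter [word], st.2.insert letter 1))
      (PySem.Dict.empty, PySem.Dict.empty)
    = words.foldl
      (fun (st : PySem.Dict String (List String) × PySem.Dict String Int) word =>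
        let letter := pvKey letter_index word
        if st.1.contains letter then
          (st.1.modify letter [] (fun g => g ++ [word]), st.2.modify letter 0 (fun n => n + 1))
        else
          (st.1.insert letter [word], st.2.insert letter 1))
      (PySem.Dict.empty, PySem.Dict.empty) := by
    apply PySem.List.foldl_congr_mem
    intro acc w hw
    have := hp w hw
    cases hg : PySem.Str.pyGet? w letter_index with
    | none => rw [hg] at this; simp at this
    | some ch =>
      have hk : pvKey letter_index w = String.ofList [ch] := by unfold pvKey; rw [hg]; rfl
      simp [hk]
  have hpair := loop_inv words letter_index PySem.Dict.empty
  have hempty : pvMapLen PySem.Dict.empty = (PySem.Dict.empty : PySem.Dict String Int) := rfl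
  rw [hempty] at hpair
  -- B's letters, rewritten as set-of-keys under Pre_
  have hletters : words.foldl
      (fun (ls : List String) word =>
        match PySem.Str.pyGet? word letter_index with
        | none => ls
        | some ch =>
          let letter := String.ofList [ch]
          if letter ∈ ls then ls else ls ++ [letter])
      []
    = PySem.Set.ofList (words.map (pvKey letter_index)) := by
    rw [PySem.Set.ofList_eq_foldl, List.foldl_map]
    apply PySem.List.foldl_congr_mem
    intro acc w hw
    have := hp w hw
    cases hg : PySem.Str.pyGet? w letter_index with
    | none => rw [hg] at this; simp at this
    | some ch =>
      have hk : pvKey letter_index w = String.ofList [ch] := by unfold pvKey; rw [hg]; rfl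
      simp [hk, PySem.Set.add_eq_ite]
  -- B's filter predicate agrees with pvKey under Pre_
  have hfilt : ∀ l : String, words.filter (fun w =>
        match PySem.Str.pyGet? w letter_index with
        | none => false
        | some ch => String.ofList [ch] == l)
      = words.filter (fun w => pvKey letter_index w == l) := by
    intro l
    apply List.filter_congr
    intro w hw
    have := hp w hw
    cases hg : PySem.Str.pyGet? w letter_index with
    | none => rw [hg] at this; simp at this
    | some ch =>
      have hk : pvKey letter_index w = String.ofList [ch] := by unfold pvKey; rw [hg]; rfl
      simp [hk]
  simp only [hA, hpair, hletters, hfilt]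
  set L := PySem.Set.ofList (words.map (pvKey letter_index)) with hL
  have hLnodup : L.Nodup := PySem.Set.nodup_ofList _
  have hfreshG : ∀ a ∈ L, (PySem.Dict.empty : PySem.Dict String (List String)).contains a = false := by
    intro a _; simp [PySem.Dict.contains_empty]
  have hfreshC : ∀ a ∈ L, (PySem.Dict.empty : PySem.Dict String Int).contains a = false := by
    intro a _; simp [PySem.Dict.contains_empty]
  -- B's groups dict
  have hBitems : (L.foldl
      (fun (d : PySem.Dict String (List String)) l =>
        d.insert l (words.filter (fun w => pvKey letter_index w == l)))
      PySem.Dict.empty).items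
    = L.map (fun l => (l, words.filter (fun w => pvKey letter_index w == l))) := by
    rw [PySem.Dict.items_foldl_insert_fresh (k := fun a => a)
      (v := fun l => words.filter (fun w => pvKey letter_index w == l)) _ _ hfreshG (by simpa using hLnodup)]
    rfl
  have hBeq : (L.foldl
      (fun (d : PySem.Dict String (List String)) l =>
        d.insert l (words.filter (fun w => pvKey letter_index w == l)))
      PySem.Dict.empty)
    = pvGroups words letter_index := by
    apply PySem.Dict.ext
    rw [hBitems, pvGroups_items]
  rw [hBeq]
  -- counts: both sides are length-per-key over the same groups
  have hCitems : ∀ dB : PySem.Dict String (List String), (L.foldl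
      (fun (c : PySem.Dict String Int) l => c.insert l ((dB.getD l []).length : Int))
      PySem.Dict.empty).items
    = L.map (fun l => (l, ((dB.getD l []).length : Int))) := by
    intro dB
    rw [PySem.Dict.items_foldl_insert_fresh (k := fun a => a)
      (v := fun l => ((dB.getD l []).length : Int)) _ _ hfreshC (by simpa using hLnodup)]
    rfl
  refine Prod.ext ?_ ?_
  · rfl
  · show (pvMapLen (pvGroups words letter_index)).items = _
    rw [hCitems]
    show ((pvGroups words letter_index).items.map (fun p => (p.1, (p.2.length : Int)))) = _
    rw [pvGroups_items, List.map_map]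
    exact List.map_congr_left (fun l _ => by simp [pvGroups_getD])
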